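-- pv_equiv track=rewrite | github.com/namboy94/octorust | scripts/generate-bindings.py | determine_code_blocks
-- ===== SOURCE A (Python) =====
-- from typing import List, Tuple
--
-- def determine_code_blocks(content: List[str]) -> List[List[str]]:
--
--     blocks = []
--     current_block = []
--
--     for line in content:
--
--         if line.strip() != "":
--             current_block.append(line)
--         elif len(current_block) > 0:
--             blocks.append(current_block)
--             current_block = []
--
--     return blocks
-- ===== SOURCE B (Python) =====
-- from typing import List
--
--
-- def determine_code_blocks(content: List[str]) -> List[List[str]]:
--     blank_positions = [i for i, line in enumerate(content) if line.strip() == ""]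
--     blocks = []
--     prev = -1
--     for i in blank_positions:
--         if i - prev > 1:
--             blocks.append(content[prev + 1:i])
--         prev = i
--     return blocks
-- ===== Notes on version B (the rewrite author's own statement) =====
-- stated objective: alternative
-- what changed: B works over indices instead of lines: it first computes the list of blank-line positions, then slices the input between consecutive blank positions (keeping non-empty slices), instead of A's accumulator loop that collects lines and flushes on blanks.
import Mathlib
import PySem

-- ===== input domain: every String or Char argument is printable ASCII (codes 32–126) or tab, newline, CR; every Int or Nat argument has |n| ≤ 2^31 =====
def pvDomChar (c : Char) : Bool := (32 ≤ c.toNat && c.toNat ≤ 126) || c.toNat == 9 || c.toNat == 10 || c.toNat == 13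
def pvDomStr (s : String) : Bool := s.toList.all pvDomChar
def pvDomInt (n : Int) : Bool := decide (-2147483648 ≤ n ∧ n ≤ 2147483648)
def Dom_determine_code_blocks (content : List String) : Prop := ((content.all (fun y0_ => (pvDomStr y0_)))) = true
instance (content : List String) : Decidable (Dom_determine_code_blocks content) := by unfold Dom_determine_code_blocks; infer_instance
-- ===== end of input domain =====

-- B computes the list of blank-line positions first and then slices the input between
-- consecutive blank positions, instead of A's line accumulator flushed on blanks; same value.


-- ===== PORT A =====
-- A's loop, line by line: append non-blank lines to current_block, flush it on a blank line.
def dcbLoopA : List String → List (List String) → List String → List (List String)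
  | [], blocks, _ => blocks
  | l :: ls, blocks, cur =>
    if PySem.Str.strip l ≠ "" then dcbLoopA ls blocks (cur ++ [l])
    else if 0 < cur.length then dcbLoopA ls (blocks ++ [cur]) []
    else dcbLoopA ls blocks cur

def determine_code_blocks (content : List String) : List (List String) :=
  dcbLoopA content [] []

-- ===== PORT B =====
-- [i for i, line in enumerate(content) if line.strip() == ""]
def dcbBlankIdx (content : List String) : List Int :=
  ((PySem.List.enumerate content).filter (fun p => PySem.Str.strip p.2 == "")).map (fun p => p.1)

-- B's loop over the blank positions: slice content between consecutive blank positions.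
def dcbLoopB (content : List String) : List Int → List (List String) → Int → List (List String)
  | [], blocks, _ => blocks
  | i :: ps, blocks, prev =>
    if i - prev > 1 then
      dcbLoopB content ps (blocks ++ [PySem.List.slice content (some (prev + 1)) (some i)]) i
    else dcbLoopB content ps blocks i

def determine_code_blocks_alt (content : List String) : List (List String) :=
  dcbLoopB content (dcbBlankIdx content) [] (-1)

-- ===== PRECONDITION & SPEC =====
def Spec_determine_code_blocks (content : List String) (out : List (List String)) : Prop := out = determine_code_blocks_alt content
instance (content : List String) (out : List (List String)) : Decidable (Spec_determine_code_blocks content out) := by unfold Spec_determine_code_blocks; infer_instance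

-- ===== CLAIM (what is proved, stated in full; the proofs are below) =====
def Claim_equal_determine_code_blocks : Prop := ∀ (content : List String), Dom_determine_code_blocks content → Spec_determine_code_blocks content (determine_code_blocks content)

-- ===== LEMMAS AND PROOFS =====

def dcbBlank (l : String) : Bool := PySem.Str.strip l == ""

lemma dcb_mem_takeWhile {α : Type} (p : α → Bool) (l : List α) :
    ∀ z ∈ l.takeWhile p, p z = true := by
  induction l with
  | nil => simp
  | cons a l ih =>
    intro z hz
    rw [List.takeWhile_cons] at hz
    by_cases ha : p a = true
    · simp only [ha, if_true] at hz
      rcases List.mem_cons.mp hz with h | h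
      · subst h; exact ha
      · exact ih z h
    · simp [ha] at hz

-- A accumulates a whole non-blank run onto the current block.
lemma dcbLoopA_nonblank (g rest : List String) (blocks : List (List String))
    (hg : ∀ y ∈ g, dcbBlank y = false) :
    ∀ cur, dcbLoopA (g ++ rest) blocks cur = dcbLoopA rest blocks (cur ++ g) := by
  induction g with
  | nil => simp
  | cons y ys ih =>
    intro cur
    have hy' : PySem.Str.strip y ≠ "" := by
      simpa [dcbBlank] using hg y (by simp)
    simp only [List.cons_append, dcbLoopA, hy', ne_eq, not_false_eq_true, if_pos]
    rw [ih (fun z hz => hg z (by simp [hz])) (cur ++ [y])]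
    simp

-- blank indices of a list with a non-blank prefix and a first blank line.
lemma dcbBlankIdx_enum (g : List String) (b : String) (rest : List String) (s : Int)
    (hg : ∀ y ∈ g, dcbBlank y = false) (hb : dcbBlank b = true) :
    ((PySem.List.enumerate (g ++ b :: rest) s).filter (fun p => PySem.Str.strip p.2 == "")).map (fun p => p.1)
      = (s + g.length) ::
        ((PySem.List.enumerate rest (s + g.length + 1)).filter (fun p => PySem.Str.strip p.2 == "")).map (fun p => p.1) := by
  induction g generalizing s with
  | nil =>
    have hb' : (PySem.Str.strip b == "") = true := hb
    simp [PySem.List.enumerate_cons, hb']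
  | cons y ys ih =>
    have hy : (PySem.Str.strip y == "") = false := hg y (by simp)
    simp only [List.cons_append, PySem.List.enumerate_cons, List.filter_cons, hy,
      Bool.false_eq_true, if_false]
    rw [ih (s + 1) (fun z hz => hg z (List.mem_cons_of_mem y hz))]
    have h1 : s + 1 + (ys.length : Int) = s + (((y :: ys).length : ℕ) : Int) := by
      simp only [List.length_cons]; push_cast; ring
    rw [h1]

-- no blank lines: no blank indices.
lemma dcbBlankIdx_none (g : List String) (s : Int) (hg : ∀ y ∈ g, dcbBlank y = false) :
    ((PySem.List.enumerate g s).filter (fun p => PySem.Str.strip p.2 == "")).map (fun p => p.1) = [] := by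
  induction g generalizing s with
  | nil => simp
  | cons y ys ih =>
    have hy : (PySem.Str.strip y == "") = false := hg y (by simp)
    simp only [PySem.List.enumerate_cons, List.filter_cons, hy]
    exact ih (s + 1) (fun z hz => hg z (by simp [hz]))

-- shifting off a prefix: B's loop with all positions ≥ the prefix length ignores the prefix.
lemma dcbLoopB_shift (x : String) (t : List String) (ps : List Int)
    (blocks : List (List String)) (q : Int) (hq : -1 ≤ q) (hps : ∀ i ∈ ps, 0 ≤ i) :
    dcbLoopB (x :: t) (ps.map (· + 1)) blocks (q + 1) = dcbLoopB t ps blocks q := by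
  induction ps generalizing blocks q with
  | nil => simp [dcbLoopB]
  | cons i ps ih =>
    have hi : 0 ≤ i := hps i (by simp)
    have hslice : PySem.List.slice (x :: t) (some (q + 1 + 1)) (some (i + 1))
        = PySem.List.slice t (some (q + 1)) (some i) := by
      rw [PySem.List.slice_toNat (x :: t) (by omega) (by omega),
          PySem.List.slice_toNat t (by omega) hi]
      have h1 : (q + 1 + 1).toNat = (q + 1).toNat + 1 := by omega
      have h2 : (i + 1).toNat = i.toNat + 1 := by omega
      simp [h1, h2]
    simp only [List.map_cons, dcbLoopB]
    have hcond : (i + 1 - (q + 1) > 1) = (i - q > 1) := by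
      congr 1; omega
    by_cases hc : i - q > 1
    · rw [if_pos (by omega), if_pos hc, hslice]
      exact ih _ i (by omega) (fun z hz => hps z (by simp [hz]))
    · rw [if_neg (by omega), if_neg hc]
      exact ih _ i (by omega) (fun z hz => hps z (by simp [hz]))

lemma dcbLoopB_shift_many (pre : List String) (t : List String) (ps : List Int)
    (blocks : List (List String)) (q : Int) (hq : -1 ≤ q) (hps : ∀ i ∈ ps, 0 ≤ i) :
    dcbLoopB (pre ++ t) (ps.map (· + pre.length)) blocks (q + pre.length) = dcbLoopB t ps blocks q := by
  induction pre generalizing blocks with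
  | nil => simp
  | cons x xs ih =>
    have : ps.map (· + ((x :: xs).length : Int)) = (ps.map (· + (xs.length : Int))).map (· + 1) := by
      simp only [List.map_map, List.length_cons]
      apply List.map_congr_left
      intro z _
      simp only [Function.comp_apply]
      push_cast; ring
    rw [this, List.cons_append]
    have hq' : -1 ≤ q + xs.length := by omega
    have hcast : q + ((x :: xs).length : Int) = (q + xs.length) + 1 := by
      simp only [List.length_cons]; push_cast; ring
    rw [hcast,
      dcbLoopB_shift x (xs ++ t) (ps.map (· + (xs.length : Int))) blocks (q + xs.length) hq'
        (by intro i hi; rcases List.mem_map.mp hi with ⟨z, hz, rfl⟩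
            have := hps z hz; omega)]
    exact ih blocks

lemma dcbBlankIdx_nonneg (content : List String) :
    ∀ i ∈ dcbBlankIdx content, 0 ≤ i := by
  intro i hi
  unfold dcbBlankIdx at hi
  rcases List.mem_map.mp hi with ⟨p, hp, rfl⟩
  have hp' := List.mem_of_mem_filter hp
  rcases (PySem.List.mem_enumerate_iff _ _ _).mp hp' with ⟨k, hk, rfl⟩
  simp

-- blank indices computed from a shifted start are the 0-based ones shifted.
-- blank indices computed from a shifted start are the 0-based ones shifted.
lemma dcb_shift_enum (s : Int) (l : List String) :
    ((PySem.List.enumerate l s).filter (fun p => PySem.Str.strip p.2 == "")).map (fun p => p.1)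
    = (((PySem.List.enumerate l 0).filter (fun p => PySem.Str.strip p.2 == "")).map (fun p => p.1)).map (· + s) := by
  induction l generalizing s with
  | nil => simp
  | cons y ys ihy =>
    simp only [PySem.List.enumerate_cons, List.filter_cons]
    by_cases hy : (PySem.Str.strip y == "") = true
    · simp only [hy, if_pos, List.map_cons]
      rw [ihy (s + 1), ihy (0 + 1)]
      simp only [List.map_map, zero_add]
      congr 1
      apply List.map_congr_left
      intro z _
      simp only [Function.comp_apply]
      ring
    · simp only [Bool.not_eq_true] at hy
      simp only [hy, Bool.false_eq_true, if_false]
      rw [ihy (s + 1), ihy (0 + 1)]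
      simp only [List.map_map, zero_add]
      congr 1
      funext z
      simp only [Function.comp_apply]
      ring

-- Main lemma: A's line loop equals B's index loop, at a fresh-block state.
lemma dcb_main (n : ℕ) (content : List String) (hn : content.length ≤ n)
    (blocks : List (List String)) :
    dcbLoopA content blocks [] = dcbLoopB content (dcbBlankIdx content) blocks (-1) := by
  induction n generalizing content blocks with
  | zero =>
    have : content = [] := List.eq_nil_of_length_eq_zero (Nat.le_zero.mp hn)
    subst this; simp [dcbBlankIdx, dcbLoopA, dcbLoopB]
  | succ n ih =>
    have hsplit := List.takeWhile_append_dropWhile (p := fun y => !dcbBlank y) (l := content)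
    have hgmem : ∀ y ∈ content.takeWhile (fun y => !dcbBlank y), dcbBlank y = false := by
      intro y hy
      have := dcb_mem_takeWhile (fun y => !dcbBlank y) content y hy
      simpa using this
    generalize hgdef : content.takeWhile (fun y => !dcbBlank y) = g at hsplit hgmem
    cases hdrop : content.dropWhile (fun y => !dcbBlank y) with
    | nil =>
      -- no blank line at all: A drops the trailing run, B has no positions.
      have hcg : content = g := by rw [← hsplit, hdrop, List.append_nil]
      rw [hcg]
      rw [show g = g ++ ([] : List String) by simp, dcbLoopA_nonblank g [] blocks hgmem []]
      simp only [dcbLoopA, List.append_nil]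
      unfold dcbBlankIdx
      rw [show PySem.List.enumerate g = PySem.List.enumerate g 0 from rfl,
          dcbBlankIdx_none g 0 hgmem]
      simp [dcbLoopB]
    | cons b rest =>
      have hb : dcbBlank b = true := by
        have := List.head?_dropWhile_not (p := fun y => !dcbBlank y) (l := content)
        rw [hdrop] at this
        simpa using this
      have hcontent : content = g ++ b :: rest := by rw [← hsplit, hdrop]
      have hlen : rest.length ≤ n := by
        have : content.length = g.length + 1 + rest.length := by
          rw [hcontent]; simp; omega
        omega
      -- A side
      rw [hcontent, dcbLoopA_nonblank g (b :: rest) blocks hgmem []]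
      have hbstrip : PySem.Str.strip b = "" := by simpa [dcbBlank] using hb
      simp only [List.nil_append, dcbLoopA, hbstrip, ne_eq, not_true_eq_false, if_false]
      -- B side
      unfold dcbBlankIdx
      rw [show PySem.List.enumerate (g ++ b :: rest) = PySem.List.enumerate (g ++ b :: rest) 0 from rfl,
          dcbBlankIdx_enum g b rest 0 hgmem hb]
      simp only [dcbLoopB, zero_add]
      have hshift : ∀ blocks' : List (List String),
          dcbLoopB (g ++ b :: rest)
            (((PySem.List.enumerate rest ((g.length : Int) + 1)).filter
                (fun p => PySem.Str.strip p.2 == "")).map (fun p => p.1))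
            blocks' (g.length : Int)
            = dcbLoopB rest (dcbBlankIdx rest) blocks' (-1) := by
        intro blocks'
        have henum : ((PySem.List.enumerate rest ((g.length : Int) + 1)).filter
              (fun p => PySem.Str.strip p.2 == "")).map (fun p => p.1)
            = (dcbBlankIdx rest).map (· + ((g ++ [b]).length : Int)) := by
          unfold dcbBlankIdx
          rw [dcb_shift_enum ((g.length : Int) + 1) rest]
          congr 1
          · funext z
            simp only [List.length_append, List.length_cons, List.length_nil]
            push_cast; ring
        rw [henum]
        have hmany := dcbLoopB_shift_many (g ++ [b]) rest (dcbBlankIdx rest) blocks' (-1)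
          (by omega) (dcbBlankIdx_nonneg rest)
        have hq : (-1 : Int) + (((g ++ [b]).length : ℕ) : Int) = (g.length : Int) := by
          simp only [List.length_append, List.length_cons, List.length_nil]
          push_cast; ring
        rw [hq] at hmany
        rw [show g ++ b :: rest = (g ++ [b]) ++ rest by simp]
        exact hmany
      by_cases hg0 : 0 < g.length
      · have hcond : (g.length : Int) - (-1) > 1 := by
          have : (1 : Int) ≤ (g.length : Int) := by exact_mod_cast hg0
          omega
        rw [if_pos hg0, if_pos hcond]
        have hslice : PySem.List.slice (g ++ b :: rest) (some (-1 + 1)) (some (g.length : Int)) = g := by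
          rw [show (-1 : Int) + 1 = ((0 : ℕ) : Int) by norm_num,
              PySem.List.slice_natCast]
          simp
        rw [hslice, hshift]
        exact ih rest hlen (blocks ++ [g])
      · have hg : g = [] := List.eq_nil_of_length_eq_zero (by omega)
        subst hg
        rw [if_neg (by simp), if_neg (by norm_num)]
        simp only [List.length_nil, Nat.cast_zero, List.nil_append, zero_add] at hshift ⊢
        rw [hshift]
        exact ih rest hlen blocks

-- ===== VERDICT (by name: the statement is the Claim_ definition above) =====
theorem determine_code_blocks_spec : Claim_equal_determine_code_blocks := by
  intro content _
  unfold Spec_determine_code_blocks determine_code_blocks determine_code_blocks_alt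
  exact dcb_main content.length content le_rfl []
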